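-- pv_equiv track=rewrite | github.com/raphael-group/RAIG | src/utils.py | formatEdgeId
-- ===== SOURCE A (Python) =====
-- def formatEdgeId(showppp, outregionA, outregionD):#abbA, abbD):
-- 	edgesetA = dict()
-- 	edgesetD = dict()
-- 	PosA = dict()
-- 	PosD = dict()
-- 	edgeWeightA = dict()
-- 	edgeWeightD = dict()
-- 	edgetoPatient = dict()
-- 	edgeid = 0
-- 	for ppp in showppp:
-- 		if ppp in outregionA:
-- 			for i in range(0, len(outregionA[ppp]), 2):
-- 				edgesetA[edgeid] = list()
-- 				start, end = outregionA[ppp][i], outregionA[ppp][i+1]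
-- 				#edgeWeightA[edgeid] = abbA[ppp][i/2]
-- 				edgesetA[edgeid].append(start)
-- 				edgesetA[edgeid].append(end)
-- 				edgetoPatient[edgeid] = ppp
-- 				if start not in PosA:
-- 					PosA[start] = list()
-- 				PosA[start].append(edgeid)
-- 				if end not in PosA:
-- 					PosA[end] = list()
-- 				PosA[end].append(edgeid)
-- 				edgeid += 1
--
-- 		if ppp in outregionD:
-- 			for i in range(0, len(outregionD[ppp]), 2):
-- 				edgesetD[edgeid] = list()
-- 				#edgeWeightD[edgeid] = abbD[ppp][i/2]
-- 				start, end = outregionD[ppp][i], outregionD[ppp][i+1]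
-- 				edgesetD[edgeid].append(start)
-- 				edgesetD[edgeid].append(end)
-- 				edgetoPatient[edgeid] = ppp
-- 				if start not in PosD:
-- 					PosD[start] = list()
-- 				PosD[start].append(edgeid)
-- 				if end not in PosD:
-- 					PosD[end] = list()
-- 				PosD[end].append(edgeid)
-- 				edgeid += 1
-- 	return edgesetA, edgesetD, edgetoPatient, edgeWeightA, edgeWeightD, PosA, PosD #, posToEidA, posToEidD
-- ===== SOURCE B (Python) =====
-- def formatEdgeId(showppp, outregionA, outregionD):
--     # pass 1: one ordered list of edge records (eid, patient, start, end, tag)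
--     records = []
--     eid = 0
--     for ppp in showppp:
--         for regions, tag in ((outregionA, 'A'), (outregionD, 'D')):
--             if ppp in regions:
--                 vals = regions[ppp]
--                 for i in range(0, len(vals), 2):
--                     records.append((eid, ppp, vals[i], vals[i + 1], tag))
--                     eid += 1
--     # pass 2: build each output table from the record list
--     edgesetA = {e: [s, t] for (e, p, s, t, g) in records if g == 'A'}
--     edgesetD = {e: [s, t] for (e, p, s, t, g) in records if g == 'D'}
--     edgetoPatient = {e: p for (e, p, s, t, g) in records}
--     PosA, PosD = {}, {}
--     for (e, p, s, t, g) in records: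
--         Pos = PosA if g == 'A' else PosD
--         Pos.setdefault(s, []).append(e)
--         Pos.setdefault(t, []).append(e)
--     return edgesetA, edgesetD, edgetoPatient, {}, {}, PosA, PosD
-- ===== Notes on version B (the rewrite author's own statement) =====
-- stated objective: alternative
-- what changed: B replaces A's single interleaved loop that mutates seven dicts at once by two passes: a first pass that only collects an ordered list of edge records (edgeid, patient, start, end, A/D tag), and a second pass that builds each output table (edge sets, edge-to-patient, position indexes) from that record list.
import Mathlib
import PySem

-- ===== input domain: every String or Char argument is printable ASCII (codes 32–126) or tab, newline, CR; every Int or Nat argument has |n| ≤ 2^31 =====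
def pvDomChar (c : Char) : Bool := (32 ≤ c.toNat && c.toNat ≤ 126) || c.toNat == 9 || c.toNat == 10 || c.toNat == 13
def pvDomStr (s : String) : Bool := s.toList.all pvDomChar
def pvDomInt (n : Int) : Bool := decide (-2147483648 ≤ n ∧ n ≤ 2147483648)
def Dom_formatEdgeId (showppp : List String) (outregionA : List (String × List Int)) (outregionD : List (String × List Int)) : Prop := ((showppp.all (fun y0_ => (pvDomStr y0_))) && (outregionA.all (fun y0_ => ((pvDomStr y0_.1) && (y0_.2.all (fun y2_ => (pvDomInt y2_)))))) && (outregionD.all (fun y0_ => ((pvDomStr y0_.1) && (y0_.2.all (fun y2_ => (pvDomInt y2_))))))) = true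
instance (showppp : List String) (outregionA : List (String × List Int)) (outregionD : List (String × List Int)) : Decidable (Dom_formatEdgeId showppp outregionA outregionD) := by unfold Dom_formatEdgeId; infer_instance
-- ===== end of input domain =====

-- B builds an ordered edge-record list first and derives every output table from it in a
-- second pass, instead of A's one loop mutating all seven dicts at once (alternative decomposition, same cost).

-- ===== PORT A =====
-- full mutable state of A's loop: the five dicts that change, plus the edgeid counter
structure FmtSt where
  esA : PySem.Dict Int (List Int)
  esD : PySem.Dict Int (List Int)
  etp : PySem.Dict Int String
  posA : PySem.Dict Int (List Int)
  posD : PySem.Dict Int (List Int)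
  eid : Int
deriving Repr, DecidableEq

-- 'if p not in Pos: Pos[p] = list(); Pos[p].append(e)'
def posUpd (d : PySem.Dict Int (List Int)) (p e : Int) : PySem.Dict Int (List Int) :=
  let d' := if d.contains p then d else d.insert p []
  d'.modify p [] (fun l => l ++ [e])

-- body of A's inner A-block loop (i runs over range(0, len(vals), 2))
def fmtStepA (ppp : String) (vals : List Int) (st : FmtSt) (i : Int) : FmtSt :=
  let s := PySem.List.pyGetD vals i 0
  let t := PySem.List.pyGetD vals (i + 1) 0
  { st with
    esA := ((st.esA.insert st.eid []).modify st.eid [] (fun l => l ++ [s])).modify st.eid [] (fun l => l ++ [t]),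
    etp := st.etp.insert st.eid ppp,
    posA := posUpd (posUpd st.posA s st.eid) t st.eid,
    eid := st.eid + 1 }

-- body of A's inner D-block loop
def fmtStepD (ppp : String) (vals : List Int) (st : FmtSt) (i : Int) : FmtSt :=
  let s := PySem.List.pyGetD vals i 0
  let t := PySem.List.pyGetD vals (i + 1) 0
  { st with
    esD := ((st.esD.insert st.eid []).modify st.eid [] (fun l => l ++ [s])).modify st.eid [] (fun l => l ++ [t]),
    etp := st.etp.insert st.eid ppp,
    posD := posUpd (posUpd st.posD s st.eid) t st.eid,
    eid := st.eid + 1 }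

def formatEdgeId (showppp : List String) (outregionA : List (String × List Int)) (outregionD : List (String × List Int)) : (List (Int × List Int)) × (List (Int × List Int)) × (List (Int × String)) × (List (Int × List Int)) × (List (Int × List Int)) × (List (Int × List Int)) × (List (Int × List Int)) :=
  let dA := PySem.Dict.ofList outregionA
  let dD := PySem.Dict.ofList outregionD
  let st0 : FmtSt := ⟨PySem.Dict.empty, PySem.Dict.empty, PySem.Dict.empty, PySem.Dict.empty, PySem.Dict.empty, 0⟩
  let fin := showppp.foldl (fun st ppp =>
      let st1 := if dA.contains ppp then
          (PySem.List.pyRange 0 ((dA.getD ppp []).length : Int) 2).foldl (fmtStepA ppp (dA.getD ppp [])) st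
        else st
      if dD.contains ppp then
        (PySem.List.pyRange 0 ((dD.getD ppp []).length : Int) 2).foldl (fmtStepD ppp (dD.getD ppp [])) st1
      else st1) st0
  (fin.esA.items, fin.esD.items, fin.etp.items, [], [], fin.posA.items, fin.posD.items)

-- ===== PORT B =====
-- one edge record of B's first pass
structure ERec where
  eid : Int
  ppp : String
  s : Int
  t : Int
  isA : Bool
deriving Repr, DecidableEq

-- 'records.append((eid, ppp, vals[i], vals[i+1], tag)); eid += 1'
def recStep (ppp : String) (isA : Bool) (vals : List Int) (acc : List ERec × Int) (i : Int) : List ERec × Int :=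
  (acc.1 ++ [⟨acc.2, ppp, PySem.List.pyGetD vals i 0, PySem.List.pyGetD vals (i + 1) 0, isA⟩], acc.2 + 1)

-- pass 1: the ordered record list
def buildRecords (showppp : List String) (dA dD : PySem.Dict String (List Int)) : List ERec :=
  (showppp.foldl (fun acc ppp =>
      let acc1 := if dA.contains ppp then
          (PySem.List.pyRange 0 ((dA.getD ppp []).length : Int) 2).foldl (recStep ppp true (dA.getD ppp [])) acc
        else acc
      if dD.contains ppp then
        (PySem.List.pyRange 0 ((dD.getD ppp []).length : Int) 2).foldl (recStep ppp false (dD.getD ppp [])) acc1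
      else acc1) (([], 0) : List ERec × Int)).1

-- 'Pos.setdefault(s, []).append(e)'
def posUpdB (d : PySem.Dict Int (List Int)) (p e : Int) : PySem.Dict Int (List Int) :=
  (d.setdefault p []).modify p [] (fun l => l ++ [e])

def formatEdgeId_alt (showppp : List String) (outregionA : List (String × List Int)) (outregionD : List (String × List Int)) : (List (Int × List Int)) × (List (Int × List Int)) × (List (Int × String)) × (List (Int × List Int)) × (List (Int × List Int)) × (List (Int × List Int)) × (List (Int × List Int)) :=
  let dA := PySem.Dict.ofList outregionA
  let dD := PySem.Dict.ofList outregionD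
  let rs := buildRecords showppp dA dD
  let esA := rs.foldl (fun d r => if r.isA then d.insert r.eid [r.s, r.t] else d) (PySem.Dict.empty : PySem.Dict Int (List Int))
  let esD := rs.foldl (fun d r => if r.isA then d else d.insert r.eid [r.s, r.t]) (PySem.Dict.empty : PySem.Dict Int (List Int))
  let etp := rs.foldl (fun d r => d.insert r.eid r.ppp) (PySem.Dict.empty : PySem.Dict Int String)
  let pos := rs.foldl (fun (pd : PySem.Dict Int (List Int) × PySem.Dict Int (List Int)) r =>
      if r.isA then (posUpdB (posUpdB pd.1 r.s r.eid) r.t r.eid, pd.2)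
      else (pd.1, posUpdB (posUpdB pd.2 r.s r.eid) r.t r.eid))
    ((PySem.Dict.empty, PySem.Dict.empty) : PySem.Dict Int (List Int) × PySem.Dict Int (List Int))
  (esA.items, esD.items, etp.items, [], [], pos.1.items, pos.2.items)

-- ===== PRECONDITION & SPEC =====
-- Pre_ excludes exactly the inputs where Python A raises IndexError: a patient of showppp whose
-- region list (first dict match) has odd length, so vals[i+1] falls off the end.
def Pre_formatEdgeId (showppp : List String) (outregionA : List (String × List Int)) (outregionD : List (String × List Int)) : Prop :=
  ∀ ppp ∈ showppp,
    (∀ v, (PySem.Dict.ofList outregionA).get? ppp = some v → v.length % 2 = 0) ∧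
    (∀ v, (PySem.Dict.ofList outregionD).get? ppp = some v → v.length % 2 = 0)
instance (showppp : List String) (outregionA : List (String × List Int)) (outregionD : List (String × List Int)) : Decidable (Pre_formatEdgeId showppp outregionA outregionD) := by unfold Pre_formatEdgeId; infer_instance

def pvWitness_formatEdgeId : List String × (List (String × List Int)) × (List (String × List Int)) :=
  (["a", "b"], [("a", [1, 2]), ("c", [5])], [("b", [3, 4, 7, 8])])

def Spec_formatEdgeId (showppp : List String) (outregionA : List (String × List Int)) (outregionD : List (String × List Int)) (out : (List (Int × List Int)) × (List (Int × List Int)) × (List (Int × String)) × (List (Int × List Int)) × (List (Int × List Int)) × (List (Int × List Int)) × (List (Int × List Int))) : Prop := out = formatEdgeId_alt showppp outregionA outregionD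
instance (showppp : List String) (outregionA : List (String × List Int)) (outregionD : List (String × List Int)) (out : (List (Int × List Int)) × (List (Int × List Int)) × (List (Int × String)) × (List (Int × List Int)) × (List (Int × List Int)) × (List (Int × List Int)) × (List (Int × List Int))) : Decidable (Spec_formatEdgeId showppp outregionA outregionD out) := by
  unfold Spec_formatEdgeId
  haveI h3 : DecidableEq ((List (Int × List Int)) × (List (Int × List Int))) := instDecidableEqProd
  haveI h4 : DecidableEq ((List (Int × List Int)) × (List (Int × List Int)) × (List (Int × List Int))) := instDecidableEqProd
  haveI h5 : DecidableEq ((List (Int × List Int)) × (List (Int × List Int)) × (List (Int × List Int)) × (List (Int × List Int))) := instDecidableEqProd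
  haveI h6 : DecidableEq ((List (Int × String)) × (List (Int × List Int)) × (List (Int × List Int)) × (List (Int × List Int)) × (List (Int × List Int))) := instDecidableEqProd
  haveI h7 : DecidableEq ((List (Int × List Int)) × (List (Int × String)) × (List (Int × List Int)) × (List (Int × List Int)) × (List (Int × List Int)) × (List (Int × List Int))) := instDecidableEqProd
  exact instDecidableEqProd _ _

-- ===== CLAIM (what is proved, stated in full; the proofs are below) =====
def Claim_equal_formatEdgeId : Prop := ∀ (showppp : List String) (outregionA : List (String × List Int)) (outregionD : List (String × List Int)), Dom_formatEdgeId showppp outregionA outregionD → Pre_formatEdgeId showppp outregionA outregionD → Spec_formatEdgeId showppp outregionA outregionD (formatEdgeId showppp outregionA outregionD)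

-- ===== LEMMAS AND PROOFS =====

-- five-dict state without the counter
abbrev Q5 := PySem.Dict Int (List Int) × PySem.Dict Int (List Int) × PySem.Dict Int String × PySem.Dict Int (List Int) × PySem.Dict Int (List Int)

def toQ (st : FmtSt) : Q5 := (st.esA, st.esD, st.etp, st.posA, st.posD)
def ofQ (q : Q5) (e : Int) : FmtSt := ⟨q.1, q.2.1, q.2.2.1, q.2.2.2.1, q.2.2.2.2, e⟩

-- the effect of one record on the five dicts
def applyRec (q : Q5) (r : ERec) : Q5 :=
  if r.isA then
    (q.1.insert r.eid [r.s, r.t], q.2.1, q.2.2.1.insert r.eid r.ppp,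
     posUpd (posUpd q.2.2.2.1 r.s r.eid) r.t r.eid, q.2.2.2.2)
  else
    (q.1, q.2.1.insert r.eid [r.s, r.t], q.2.2.1.insert r.eid r.ppp,
     q.2.2.2.1, posUpd (posUpd q.2.2.2.2 r.s r.eid) r.t r.eid)

-- records of one inner loop, recursively, with their eids
def mkRecs (ppp : String) (isA : Bool) (vals : List Int) : List Int → Int → List ERec
  | [], _ => []
  | i :: L, e => ⟨e, ppp, PySem.List.pyGetD vals i 0, PySem.List.pyGetD vals (i + 1) 0, isA⟩ :: mkRecs ppp isA vals L (e + 1)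

def blockRecs (d : PySem.Dict String (List Int)) (ppp : String) (isA : Bool) (e : Int) : List ERec :=
  if d.contains ppp then
    mkRecs ppp isA (d.getD ppp []) (PySem.List.pyRange 0 ((d.getD ppp []).length : Int) 2) e
  else []

def allRecs (dA dD : PySem.Dict String (List Int)) : List String → Int → List ERec
  | [], _ => []
  | p :: ps, e =>
    let r1 := blockRecs dA p true e
    let r2 := blockRecs dD p false (e + r1.length)
    r1 ++ r2 ++ allRecs dA dD ps (e + r1.length + r2.length)

theorem insert_modify_modify (d : PySem.Dict Int (List Int)) (k x y : Int) :
    ((d.insert k []).modify k [] (fun l => l ++ [x])).modify k [] (fun l => l ++ [y]) = d.insert k [x, y] := by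
  simp [PySem.Dict.modify, PySem.Dict.getD_insert_self, PySem.Dict.insert_insert_self]

theorem posUpdB_eq (d : PySem.Dict Int (List Int)) (p e : Int) : posUpdB d p e = posUpd d p e := by
  by_cases h : d.contains p
  · simp [posUpdB, posUpd, h, PySem.Dict.setdefault_of_contains _ _ h]
  · simp only [Bool.not_eq_true] at h
    simp [posUpdB, posUpd, h, PySem.Dict.setdefault_of_not_contains _ _ h]

theorem stepA_eq (ppp : String) (vals : List Int) (st : FmtSt) (i : Int) :
    fmtStepA ppp vals st i
      = ofQ (applyRec (toQ st) ⟨st.eid, ppp, PySem.List.pyGetD vals i 0, PySem.List.pyGetD vals (i + 1) 0, true⟩) (st.eid + 1) := by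
  simp [fmtStepA, applyRec, toQ, ofQ, insert_modify_modify]

theorem stepD_eq (ppp : String) (vals : List Int) (st : FmtSt) (i : Int) :
    fmtStepD ppp vals st i
      = ofQ (applyRec (toQ st) ⟨st.eid, ppp, PySem.List.pyGetD vals i 0, PySem.List.pyGetD vals (i + 1) 0, false⟩) (st.eid + 1) := by
  simp [fmtStepD, applyRec, toQ, ofQ, insert_modify_modify]

theorem innerA_eq (ppp : String) (vals : List Int) (L : List Int) :
    ∀ st : FmtSt, L.foldl (fmtStepA ppp vals) st
      = ofQ ((mkRecs ppp true vals L st.eid).foldl applyRec (toQ st)) (st.eid + L.length) := by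
  induction L with
  | nil => intro st; simp [mkRecs, ofQ, toQ]
  | cons i L ih =>
      intro st
      simp only [List.foldl_cons, mkRecs, ih, stepA_eq]
      simp [ofQ, toQ]
      omega

theorem innerD_eq (ppp : String) (vals : List Int) (L : List Int) :
    ∀ st : FmtSt, L.foldl (fmtStepD ppp vals) st
      = ofQ ((mkRecs ppp false vals L st.eid).foldl applyRec (toQ st)) (st.eid + L.length) := by
  induction L with
  | nil => intro st; simp [mkRecs, ofQ, toQ]
  | cons i L ih =>
      intro st
      simp only [List.foldl_cons, mkRecs, ih, stepD_eq]
      simp [ofQ, toQ]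
      omega

theorem innerB_eq (ppp : String) (isA : Bool) (vals : List Int) (L : List Int) :
    ∀ (acc : List ERec) (e : Int), L.foldl (recStep ppp isA vals) (acc, e)
      = (acc ++ mkRecs ppp isA vals L e, e + L.length) := by
  induction L with
  | nil => intro acc e; simp [mkRecs]
  | cons i L ih =>
      intro acc e
      simp only [List.foldl_cons, recStep, mkRecs, ih]
      simp
      omega

theorem length_mkRecs (ppp : String) (isA : Bool) (vals : List Int) :
    ∀ (L : List Int) (e : Int), (mkRecs ppp isA vals L e).length = L.length := by
  intro L
  induction L with
  | nil => intro e; rfl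
  | cons i L ih => intro e; simp [mkRecs, ih]

set_option maxHeartbeats 2000000 in
theorem outerA_eq (dA dD : PySem.Dict String (List Int)) (ps : List String) :
    ∀ st : FmtSt,
      ps.foldl (fun st ppp =>
        let st1 := if dA.contains ppp then
            (PySem.List.pyRange 0 ((dA.getD ppp []).length : Int) 2).foldl (fmtStepA ppp (dA.getD ppp [])) st
          else st
        if dD.contains ppp then
          (PySem.List.pyRange 0 ((dD.getD ppp []).length : Int) 2).foldl (fmtStepD ppp (dD.getD ppp [])) st1
        else st1) st
      = ofQ ((allRecs dA dD ps st.eid).foldl applyRec (toQ st))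
            (st.eid + (allRecs dA dD ps st.eid).length) := by
  induction ps with
  | nil => intro st; simp [allRecs, ofQ, toQ]
  | cons p ps ih =>
      intro st
      rw [List.foldl_cons, ih]
      by_cases hA : dA.contains p <;> by_cases hD : dD.contains p <;>
        simp only [hA, hD, if_true, if_false, Bool.false_eq_true, innerA_eq, innerD_eq,
          allRecs, blockRecs, ofQ, toQ, length_mkRecs, List.foldl_append,
          List.length_append, List.length_nil, List.nil_append, List.append_nil,
          Nat.cast_zero, Nat.cast_add, add_zero] <;>
        (congr 1 <;> first | rfl | omega)

set_option maxHeartbeats 2000000 in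
theorem outerB_eq (dA dD : PySem.Dict String (List Int)) (ps : List String) :
    ∀ (acc : List ERec) (e : Int),
      ps.foldl (fun acc ppp =>
        let acc1 := if dA.contains ppp then
            (PySem.List.pyRange 0 ((dA.getD ppp []).length : Int) 2).foldl (recStep ppp true (dA.getD ppp [])) acc
          else acc
        if dD.contains ppp then
          (PySem.List.pyRange 0 ((dD.getD ppp []).length : Int) 2).foldl (recStep ppp false (dD.getD ppp [])) acc1
        else acc1) (acc, e)
      = (acc ++ allRecs dA dD ps e, e + (allRecs dA dD ps e).length) := by
  induction ps with
  | nil => intro acc e; simp [allRecs]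
  | cons p ps ih =>
      intro acc e
      rw [List.foldl_cons, ih]
      by_cases hA : dA.contains p <;> by_cases hD : dD.contains p <;>
        simp only [hA, hD, if_true, if_false, Bool.false_eq_true, innerB_eq,
          allRecs, blockRecs, length_mkRecs, List.length_append, List.length_nil,
          List.nil_append, List.append_nil, List.append_assoc,
          Nat.cast_zero, Nat.cast_add, add_zero] <;>
        (congr 1 <;> first | rfl | omega)

theorem proj1_foldl (rs : List ERec) : ∀ q : Q5,
    (rs.foldl applyRec q).1 = rs.foldl (fun d r => if r.isA then d.insert r.eid [r.s, r.t] else d) q.1 := by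
  induction rs with
  | nil => intro q; rfl
  | cons r rs ih => intro q; cases hr : r.isA <;> simp [List.foldl_cons, applyRec, hr, ih]

theorem proj2_foldl (rs : List ERec) : ∀ q : Q5,
    (rs.foldl applyRec q).2.1 = rs.foldl (fun d r => if r.isA then d else d.insert r.eid [r.s, r.t]) q.2.1 := by
  induction rs with
  | nil => intro q; rfl
  | cons r rs ih => intro q; cases hr : r.isA <;> simp [List.foldl_cons, applyRec, hr, ih]

theorem proj3_foldl (rs : List ERec) : ∀ q : Q5,
    (rs.foldl applyRec q).2.2.1 = rs.foldl (fun d r => d.insert r.eid r.ppp) q.2.2.1 := by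
  induction rs with
  | nil => intro q; rfl
  | cons r rs ih => intro q; cases hr : r.isA <;> simp [List.foldl_cons, applyRec, hr, ih]

theorem proj45_foldl (rs : List ERec) : ∀ q : Q5,
    ((rs.foldl applyRec q).2.2.2.1, (rs.foldl applyRec q).2.2.2.2)
      = rs.foldl (fun (pd : PySem.Dict Int (List Int) × PySem.Dict Int (List Int)) r =>
          if r.isA then (posUpdB (posUpdB pd.1 r.s r.eid) r.t r.eid, pd.2)
          else (pd.1, posUpdB (posUpdB pd.2 r.s r.eid) r.t r.eid)) (q.2.2.2.1, q.2.2.2.2) := by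
  induction rs with
  | nil => intro q; rfl
  | cons r rs ih => intro q; cases hr : r.isA <;> simp [List.foldl_cons, applyRec, hr, ih, posUpdB_eq]

-- ===== VERDICT (by name: the statement is the Claim_ definition above) =====
theorem formatEdgeId_spec : Claim_equal_formatEdgeId := by
  intro showppp outregionA outregionD _ _
  unfold Spec_formatEdgeId formatEdgeId formatEdgeId_alt buildRecords
  simp only [outerA_eq, outerB_eq]
  simp only [ofQ, toQ, List.nil_append]
  refine Prod.ext ?_ (Prod.ext ?_ (Prod.ext ?_ (Prod.ext rfl (Prod.ext rfl (Prod.ext ?_ ?_)))))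
  · simp [proj1_foldl]
  · simp [proj2_foldl]
  · simp [proj3_foldl]
  · have h := proj45_foldl (allRecs (PySem.Dict.ofList outregionA) (PySem.Dict.ofList outregionD) showppp 0)
      ((PySem.Dict.empty, PySem.Dict.empty, PySem.Dict.empty, PySem.Dict.empty, PySem.Dict.empty) : Q5)
    simp at h
    simp [congrArg Prod.fst h]
  · have h := proj45_foldl (allRecs (PySem.Dict.ofList outregionA) (PySem.Dict.ofList outregionD) showppp 0)
      ((PySem.Dict.empty, PySem.Dict.empty, PySem.Dict.empty, PySem.Dict.empty, PySem.Dict.empty) : Q5)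
    simp at h
    simp [congrArg Prod.snd h]
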